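-- pv_equiv track=rewrite | github.com/Mgs25/Edabit_Challenges | is_center.py | is_central
-- ===== SOURCE A (Python) =====
-- from math import floor,ceil
--
-- def is_central(txt):
-- 	mid = floor(len(txt)/2)
-- 	txt = list(txt)
-- 	for letter in txt:
-- 		if letter != ' ':
-- 			if txt.index(letter) == mid:
-- 				return True
-- 	return False
-- ===== SOURCE B (Python) =====
-- def is_central(txt):
--     if not txt:
--         return False
--     mid = len(txt) // 2
--     return txt[mid] != ' ' and txt[mid] not in txt[:mid]
-- ===== Notes on version B (the rewrite author's own statement) =====
-- stated objective: simpler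
-- what changed: Replaces A's O(n^2) loop (calling .index on every character) by one direct check: the center character is non-space and does not occur in the prefix before the center.
import Mathlib
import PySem

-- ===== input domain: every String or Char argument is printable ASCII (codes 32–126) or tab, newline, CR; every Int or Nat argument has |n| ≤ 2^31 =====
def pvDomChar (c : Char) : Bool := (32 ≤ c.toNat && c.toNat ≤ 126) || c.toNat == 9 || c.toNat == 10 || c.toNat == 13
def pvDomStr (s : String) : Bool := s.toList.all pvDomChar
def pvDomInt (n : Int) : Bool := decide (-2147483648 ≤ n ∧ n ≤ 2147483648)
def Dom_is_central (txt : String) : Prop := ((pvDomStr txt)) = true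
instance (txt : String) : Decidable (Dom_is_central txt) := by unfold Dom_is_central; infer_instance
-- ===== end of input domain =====

-- B replaces A's O(n^2) loop of .index calls by one direct check on the center character; simpler and faster.

-- ===== PORT A =====
-- the for-loop with early return: for letter in txt: if letter != ' ' and txt.index(letter) == mid: return True
def isCentralLoop (full : List Char) (mid : Nat) : List Char → Bool
  | [] => false
  | c :: rest =>
    if c ≠ ' ' then
      if PySem.List.index? full c = some mid then true
      else isCentralLoop full mid rest
    else isCentralLoop full mid rest

def is_central (txt : String) : Bool :=
  let mid := txt.toList.length / 2
  let l := txt.toList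
  isCentralLoop l mid l

-- ===== PORT B =====
def is_central_alt (txt : String) : Bool :=
  let l := txt.toList
  if l.isEmpty then false
  else
    let mid := l.length / 2
    let c := l.getD mid ' '      -- txt[mid]; mid < length since txt is nonempty
    decide (c ≠ ' ') && !((l.take mid).contains c)   -- txt[mid] != ' ' and txt[mid] not in txt[:mid]

-- ===== PRECONDITION & SPEC =====
def Spec_is_central (txt : String) (out : Bool) : Prop := out = is_central_alt txt
instance (txt : String) (out : Bool) : Decidable (Spec_is_central txt out) := by unfold Spec_is_central; infer_instance

-- ===== CLAIM (what is proved, stated in full; the proofs are below) =====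
def Claim_equal_is_central : Prop := ∀ (txt : String), Dom_is_central txt → Spec_is_central txt (is_central txt)

-- ===== LEMMAS AND PROOFS =====

theorem loop_true_iff (full : List Char) (mid : Nat) (rest : List Char) :
    isCentralLoop full mid rest = true ↔
      ∃ c ∈ rest, c ≠ ' ' ∧ PySem.List.index? full c = some mid := by
  induction rest with
  | nil => simp [isCentralLoop]
  | cons c rest ih =>
    simp only [isCentralLoop]
    split_ifs with h1 h2
    · exact iff_of_true rfl ⟨c, List.mem_cons_self, h1, h2⟩
    · rw [ih]
      constructor
      · rintro ⟨d, hd, h3, h4⟩; exact ⟨d, List.mem_cons_of_mem _ hd, h3, h4⟩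
      · rintro ⟨d, hd, h3, h4⟩
        rcases List.mem_cons.1 hd with rfl | hd
        · exact absurd h4 h2
        · exact ⟨d, hd, h3, h4⟩
    · rw [ih]
      constructor
      · rintro ⟨d, hd, h3, h4⟩; exact ⟨d, List.mem_cons_of_mem _ hd, h3, h4⟩
      · rintro ⟨d, hd, h3, h4⟩
        rcases List.mem_cons.1 hd with rfl | hd
        · simp at h1; exact absurd h1 h3
        · exact ⟨d, hd, h3, h4⟩

theorem mem_take_iff (l : List Char) (mid : Nat) (c : Char) (hm : mid ≤ l.length) :
    c ∈ l.take mid ↔ ∃ j, ∃ hj : j < mid, l[j]'(by omega) = c := by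
  rw [List.mem_iff_getElem]
  constructor
  · rintro ⟨j, hj, hc⟩
    have hjm : j < mid := by simp [List.length_take] at hj; omega
    refine ⟨j, hjm, ?_⟩
    rw [← hc, List.getElem_take]
  · rintro ⟨j, hj, hc⟩
    refine ⟨j, by simp [List.length_take]; omega, ?_⟩
    rw [List.getElem_take]; exact hc

theorem index?_center (l : List Char) (mid : Nat) (hm : mid < l.length) (c : Char)
    (hc : l[mid] = c) :
    PySem.List.index? l c = some mid ↔ c ∉ l.take mid := by
  constructor
  · intro h hmem
    obtain ⟨hk, _, hfirst⟩ := PySem.List.getElem_of_index?_eq_some h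
    rw [mem_take_iff l mid c (by omega)] at hmem
    obtain ⟨j, hj, hje⟩ := hmem
    exact hfirst j hj hje
  · intro hmem
    rw [PySem.List.index?_eq_some_iff]
    refine ⟨l.take mid, l.drop (mid + 1), ?_, by simp; omega, hmem⟩
    rw [← hc]
    rw [List.getElem_cons_drop, List.take_append_drop]

theorem is_central_eq (txt : String) : is_central txt = is_central_alt txt := by
  simp only [is_central, is_central_alt]
  set l := txt.toList with hl
  rcases eq_or_ne l [] with h | h
  · simp [h, isCentralLoop]
  · have hlen : 0 < l.length := List.length_pos_iff.2 h
    have hm : l.length / 2 < l.length := Nat.div_lt_self hlen (by norm_num)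
    rw [if_neg (by simpa [List.isEmpty_iff] using h)]
    set mid := l.length / 2 with hmid
    have hget : l.getD mid ' ' = l[mid] := List.getD_eq_getElem l ' ' hm
    rw [hget, Bool.eq_iff_iff, loop_true_iff]
    simp only [Bool.and_eq_true, decide_eq_true_eq, Bool.not_eq_true', List.contains_eq_mem,
      decide_eq_false_iff_not]
    constructor
    · rintro ⟨c, _, hns, hidx⟩
      obtain ⟨hk, hce, hfirst⟩ := PySem.List.getElem_of_index?_eq_some hidx
      subst hce
      exact ⟨hns, (index?_center l mid hm l[mid] rfl).1 hidx⟩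
    · rintro ⟨hns, hnmem⟩
      exact ⟨l[mid], List.getElem_mem hm, hns, (index?_center l mid hm l[mid] rfl).2 hnmem⟩

-- ===== VERDICT (by name: the statement is the Claim_ definition above) =====
theorem is_central_spec : Claim_equal_is_central := by
  intro txt _
  unfold Spec_is_central
  exact is_central_eq txt
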